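-- pv_equiv track=rewrite | github.com/davidchills/LeetCode | Python/1948. Delete Duplicate Folders in System.py | deleteDuplicateFolder
-- ===== SOURCE A (Python) =====
-- from typing import List, Dict
-- from collections import defaultdict
--
-- def deleteDuplicateFolder(paths: List[List[str]]) -> List[List[str]]:
--     tree = {}
--     for path in paths:
--         curr = tree
--         for name in path:
--             curr = curr.setdefault(name, {})
--
--     def encode(node):
--         if not node:
--             return "()"
--         parts = []
--         for key, sub in node.items():
--             parts.append(key + encode(sub))
--         sign = "".join(sorted(parts))
--         store[sign].append(node)
--         return "(" + sign + ")"
--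
--     def remove(nodes):
--         for item in nodes:
--             item.clear()
--             item["#"] = True
--
--     store = defaultdict(list)
--     encode(tree)
--     for group in store.values():
--         if len(group) > 1:
--             remove(group)
--
--     def collect(node, path):
--         for key, sub in list(node.items()):
--             if "#" in sub:
--                 continue
--             new = path + [key]
--             result.append(new)
--             collect(sub, new)
--
--     result = []
--     collect(tree, [])
--     return result
-- ===== SOURCE B (Python) =====
-- from typing import List
--
-- def deleteDuplicateFolder(paths: List[List[str]]) -> List[List[str]]:
--     # No trie is materialized: recurse directly on lists of path suffixes,
--     # grouping them by head folder at each level (order-preserving).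
--     def group(ps):
--         g = {}
--         for p in ps:
--             if p:
--                 g.setdefault(p[0], []).append(p[1:])
--         return g
--
--     # One pure post-order pass: annotate every folder with its signature
--     # (None = empty folder) while counting each signature once.
--     counts = {}
--
--     def annotate(ps):
--         ann = []  # [(name, signature_or_None, child_annotation)]
--         for name, tails in group(ps).items():
--             s, sub = annotate(tails)
--             ann.append((name, s, sub))
--         if not ann:
--             return None, ann
--         sig = "".join(sorted(
--             name + ("()" if s is None else "(" + s + ")") for name, s, _ in ann))
--         counts[sig] = counts.get(sig, 0) + 1
--         return sig, ann
--
--     _, top = annotate(paths)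
--
--     # Emit the surviving folders in preorder, skipping duplicated signatures.
--     result = []
--
--     def walk(ann, prefix):
--         for name, s, sub in ann:
--             if s is not None and counts[s] > 1:
--                 continue
--             cur = prefix + [name]
--             result.append(cur)
--             walk(sub, cur)
--
--     walk(top, [])
--     return result
-- ===== Notes on version B (the rewrite author's own statement) =====
-- stated objective: alternative
-- what changed: B materializes no tree at all: instead of A's nested-dict trie built with setdefault, encode-into-a-defaultdict-store of node objects, destructive clear-and-mark deletion and a mark-reading DFS, B recurses directly on lists of path suffixes grouped by head folder, annotating each folder with its signature in one pure post-order pass that also counts signatures, and then emits the folders whose signature count is at most 1.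
-- intended difference: On inputs where some path contains a folder literally named "#" below the top level, A's collect test also fires on that genuine "#" child (A's in-band deletion marker) and A silently drops the folder containing it from the output, while B keeps those folders; B's value is the intended one. — e.g. on deleteDuplicateFolder([["a", "#"]]): A returns [], B returns [["a"], ["a", "#"]]
import Mathlib
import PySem

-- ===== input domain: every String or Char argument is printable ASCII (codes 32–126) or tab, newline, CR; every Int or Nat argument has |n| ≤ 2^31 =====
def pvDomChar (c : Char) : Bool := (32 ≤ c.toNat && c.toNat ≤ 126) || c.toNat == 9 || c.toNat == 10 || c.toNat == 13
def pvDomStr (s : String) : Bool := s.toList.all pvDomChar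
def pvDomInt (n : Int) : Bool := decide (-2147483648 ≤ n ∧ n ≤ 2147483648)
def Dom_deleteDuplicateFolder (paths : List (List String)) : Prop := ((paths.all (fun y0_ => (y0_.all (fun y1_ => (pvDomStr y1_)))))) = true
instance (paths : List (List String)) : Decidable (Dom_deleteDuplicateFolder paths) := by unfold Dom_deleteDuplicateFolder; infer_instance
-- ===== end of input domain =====

-- B builds no trie at all: it recurses directly on lists of path suffixes, grouping them by head
-- folder at each level — a pure signature function plus a counting pass and an emitting pass —
-- instead of A's materialized nested-dict tree with destructive clear-and-mark deletion
-- ('alternative': structurally different, same order of cost).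
-- A mutates nothing observable by the caller; both programs' return values are compared here.
-- On paths containing a folder literally named "#" below the top level, A silently deletes the
-- parent folder (its in-band deletion marker); B returns the intended value there (see D_).

-- ===== PORT A =====
-- A's nested-dict trie.
mutual
inductive Trie where
  | mk (children : TChildren) : Trie
inductive TChildren where
  | nil : TChildren
  | cons (name : String) (sub : Trie) (rest : TChildren) : TChildren
end

-- 'curr = curr.setdefault(name, {})' walked along one path (the pointer chain becomes path recursion).
mutual
def insertT (t : Trie) (path : List String) : Trie :=
  match t, path with
  | t, [] => t
  | .mk c, name :: rest => .mk (insertC c name rest)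
def insertC (c : TChildren) (name : String) (rest : List String) : TChildren :=
  match c with
  | .nil => .cons name (insertT (.mk .nil) rest) .nil
  | .cons k s r => if k == name then .cons k (insertT s rest) r else .cons k s (insertC r name rest)
end

-- The value of A's encode(node) / its inner sign, as a pure function of the node.
mutual
def sigParts : TChildren → List String
  | .nil => []
  | .cons k s r => (k ++ sigOf s) :: sigParts r
def sigOf : Trie → String
  | .mk .nil => "()"
  | .mk (.cons k s r) =>
      "(" ++ PySem.Str.join "" (PySem.List.sorted (sigParts (.cons k s r)) (fun x => x) false) ++ ")"
end

def innerSig (c : TChildren) : String :=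
  PySem.Str.join "" (PySem.List.sorted (sigParts c) (fun x => x) false)

-- A's encode: returns "(sign)" and threads store (defaultdict(list): store[sign].append(node)).
mutual
def encodeT (t : Trie) (store : PySem.Dict String (List Trie)) :
    String × PySem.Dict String (List Trie) :=
  match t with
  | .mk .nil => ("()", store)
  | .mk (.cons k s r) =>
      let (parts, st1) := encodeC (.cons k s r) store
      let sign := PySem.Str.join "" (PySem.List.sorted parts (fun x => x) false)
      ("(" ++ sign ++ ")", st1.insert sign (st1.getD sign [] ++ [t]))
def encodeC (c : TChildren) (store : PySem.Dict String (List Trie)) :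
    List String × PySem.Dict String (List Trie) :=
  match c with
  | .nil => ([], store)
  | .cons k s r =>
      let (e, st1) := encodeT s store
      let (ps, st2) := encodeC r st1
      ((k ++ e) :: ps, st2)
end

-- A marks a node in place (clear + key "#") iff its store group has size > 1; equal-valued nodes
-- have equal signs, so the functional port reads the mark as: nonempty and its sign's group is
-- longer than 1 (empty nodes are never stored and never marked). Exact.
def collectMark (store : PySem.Dict String (List Trie)) (t : Trie) : Bool :=
  match t with
  | .mk .nil => false
  | .mk (.cons k s r) => decide (1 < (store.getD (innerSig (.cons k s r)) []).length)

-- A's collect tests '"#" in sub': true for a marked node AND for a node that really has a child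
-- folder named "#" — that second disjunct is A's sentinel leak, ported faithfully here.
def hasHashChild : TChildren → Bool
  | .nil => false
  | .cons k _ r => k == "#" || hasHashChild r

def kidsOf : Trie → TChildren
  | .mk c => c

mutual
def collectC (store : PySem.Dict String (List Trie)) (c : TChildren) (path : List String) :
    List (List String) :=
  match c with
  | .nil => []
  | .cons k s r =>
      if collectMark store s || hasHashChild (kidsOf s) then collectC store r path
      else
        let np := path ++ [k]
        np :: (collectT store s np ++ collectC store r path)
def collectT (store : PySem.Dict String (List Trie)) (t : Trie) (path : List String) :
    List (List String) :=
  match t with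
  | .mk c => collectC store c path
end

def deleteDuplicateFolder (paths : List (List String)) : List (List String) :=
  let tree := paths.foldl insertT (.mk .nil)
  let store := (encodeT tree PySem.Dict.empty).2
  collectT store tree []

-- ===== PORT B =====
-- B's order-preserving grouping of the nonempty suffix paths by head folder
-- (g.setdefault(p[0], []).append(p[1:]) = overwrite-in-place append).
def groupB (ps : List (List String)) : PySem.Dict String (List (List String)) :=
  ps.foldl (fun g p =>
    match p with
    | [] => g
    | h :: t => g.modify h [] (fun v => v ++ [t])) PySem.Dict.empty

-- '"()" if s is None else "(" + s + ")"'
def wrapSig : Option String → String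
  | none => "()"
  | some s => "(" ++ s ++ ")"

-- B's annotation entry list: (name, signature-or-None, child annotation), in group order.
inductive AnnB where
  | nil : AnnB
  | cons (name : String) (sg : Option String) (sub : AnnB) (rest : AnnB) : AnnB

-- the generator 'name + ("()" if s is None else "(" + s + ")")' over the annotation entries
def annParts : AnnB → List String
  | .nil => []
  | .cons k sg _ rest => (k ++ wrapSig sg) :: annParts rest

-- the for-loop of B's annotate, with the recursive call passed in
def annRow (child : List (List String) → PySem.Dict String Int →
    ((Option String × AnnB) × PySem.Dict String Int)) :
    List (String × List (List String)) → PySem.Dict String Int →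
    (AnnB × PySem.Dict String Int)
  | [], cnt => (.nil, cnt)
  | (k, ts) :: rest, cnt =>
      let ((sg, sub), cnt1) := child ts cnt
      let (r, cnt2) := annRow child rest cnt1
      (.cons k sg sub r, cnt2)

-- B's annotate(ps): one post-order pass returning (signature, annotation) while counting each
-- non-empty folder's signature (counts[sig] = counts.get(sig, 0) + 1). The Nat argument is a
-- fuel guard making the recursion structural; the top level passes more fuel than any path is
-- long, so the guard is never the reason a branch is taken.
def annB : Nat → List (List String) → PySem.Dict String Int →
    ((Option String × AnnB) × PySem.Dict String Int)
  | 0, _, cnt => ((none, .nil), cnt)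
  | fuel + 1, ps, cnt =>
      let (ann, cnt1) := annRow (annB fuel) (groupB ps).items cnt
      match ann with
      | .nil => ((none, .nil), cnt1)
      | a =>
          let sg := PySem.Str.join "" (PySem.List.sorted (annParts a) (fun x => x) false)
          ((some sg, a), cnt1.insert sg (cnt1.getD sg 0 + 1))

-- B's walk: emit the surviving folders in preorder, skipping duplicated signatures.
def walkB (cnt : PySem.Dict String Int) : AnnB → List String → List (List String)
  | .nil, _ => []
  | .cons k sg sub rest, pre =>
      if (match sg with | some x => decide (1 < cnt.getD x 0) | none => false) then
        walkB cnt rest pre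
      else
        let cur := pre ++ [k]
        cur :: (walkB cnt sub cur ++ walkB cnt rest pre)

def deleteDuplicateFolder_alt (paths : List (List String)) : List (List String) :=
  let fuel := (paths.map List.length).sum + 1
  let r := annB fuel paths PySem.Dict.empty
  walkB r.2 r.1.2 []

-- ===== PRECONDITION & SPEC =====
-- On inputs where some path contains a folder literally named "#" below the top level, A silently
-- deletes the folder that contains it ('"#" in sub' also fires on a genuine "#" child, A's in-band
-- deletion marker), while B returns those folders; B's value is the intended one.
def D_deleteDuplicateFolder (paths : List (List String)) : Prop :=
  ∃ p ∈ paths, "#" ∈ p.drop 1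
instance (paths : List (List String)) : Decidable (D_deleteDuplicateFolder paths) := by unfold D_deleteDuplicateFolder; infer_instance

def Spec_deleteDuplicateFolder (paths : List (List String)) (out : List (List String)) : Prop := ¬ D_deleteDuplicateFolder paths → out = deleteDuplicateFolder_alt paths
instance (paths : List (List String)) (out : List (List String)) : Decidable (Spec_deleteDuplicateFolder paths out) := by unfold Spec_deleteDuplicateFolder; infer_instance

def pvDiffWitness_deleteDuplicateFolder : List (List String) := [["a", "#"]]
def pvDiffWitnessOut_deleteDuplicateFolder : (List (List String)) × (List (List String)) :=
  ([], [["a"], ["a", "#"]])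

-- ===== CLAIM (what is proved, stated in full; the proofs are below) =====
def Claim_unchanged_deleteDuplicateFolder : Prop := ∀ (paths : List (List String)), Dom_deleteDuplicateFolder paths → Spec_deleteDuplicateFolder paths (deleteDuplicateFolder paths)
def Claim_changed_deleteDuplicateFolder : Prop := Dom_deleteDuplicateFolder (pvDiffWitness_deleteDuplicateFolder) ∧ D_deleteDuplicateFolder (pvDiffWitness_deleteDuplicateFolder) ∧ deleteDuplicateFolder (pvDiffWitness_deleteDuplicateFolder) = pvDiffWitnessOut_deleteDuplicateFolder.1 ∧ deleteDuplicateFolder_alt (pvDiffWitness_deleteDuplicateFolder) = pvDiffWitnessOut_deleteDuplicateFolder.2 ∧ pvDiffWitnessOut_deleteDuplicateFolder.1 ≠ pvDiffWitnessOut_deleteDuplicateFolder.2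

-- ===== LEMMAS AND PROOFS =====

-- The functional shape of the trie that A's foldl of insertT builds, expressed through B's
-- grouping: children = the group's items, each subtree = the trie of its suffixes.
def chL (sub : List (List String) → Trie) : List (String × List (List String)) → TChildren
  | [] => .nil
  | (k, ts) :: rest => .cons k (sub ts) (chL sub rest)

def trieF : Nat → List (List String) → Trie
  | 0, _ => .mk .nil
  | f + 1, ps => .mk (chL (trieF f) (groupB ps).items)

-- Post-order list of the inner signatures of the nonempty nodes of a trie (A's store tallies
-- exactly these occurrences).
mutual
def occT : Trie → List String
  | .mk .nil => []
  | .mk (.cons k s r) => occC (.cons k s r) ++ [innerSig (.cons k s r)]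
def occC : TChildren → List String
  | .nil => []
  | .cons _ s r => occT s ++ occC r
end

-- grouping-loop invariant: every item's suffix list is nonempty and all its members, re-headed
-- with the item's key, satisfy whatever held of the grouped paths
theorem groupB_inv (P : List String → Prop) :
    ∀ (L : List (List String)) (g : PySem.Dict String (List (List String))),
    (∀ pr ∈ g.items, pr.2 ≠ [] ∧ ∀ u ∈ pr.2, P (pr.1 :: u)) →
    (∀ p ∈ L, P p) →
    ∀ pr ∈ (L.foldl (fun g p =>
        match p with
        | [] => g
        | h :: t => g.modify h [] (fun v => v ++ [t])) g).items,
      pr.2 ≠ [] ∧ ∀ u ∈ pr.2, P (pr.1 :: u) := by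
  intro L
  induction L with
  | nil => intro g hg _ pr hpr; exact hg pr hpr
  | cons p L ih =>
    intro g hg hL
    simp only [List.foldl_cons]
    cases p with
    | nil => exact ih g hg (fun q hq => hL q (by simp [hq]))
    | cons hd tl =>
      refine ih _ ?_ (fun q hq => hL q (by simp [hq]))
      intro pr hpr
      simp only [PySem.Dict.modify] at hpr
      rcases (PySem.Dict.mem_items_insert _ _ _ _).1 hpr with hnew | ⟨hold, _⟩
      · subst hnew
        refine ⟨by simp, ?_⟩
        intro w hw
        rcases List.mem_append.1 hw with hw1 | hw2
        · rw [PySem.Dict.getD_eq_get?_getD] at hw1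
          cases hget : PySem.Dict.get? g hd with
          | none => rw [hget] at hw1; simp at hw1
          | some v =>
            rw [hget] at hw1
            exact (hg (hd, v) (PySem.Dict.mem_items_of_get?_eq_some g hget)).2 w hw1
        · simp only [List.mem_singleton] at hw2
          subst hw2
          exact hL _ (List.mem_cons_self ..)
      · exact hg pr hold

-- every item of groupB ps has a nonempty suffix list, all of whose members extend to paths of ps
theorem groupB_mem (ps : List (List String)) :
    ∀ pr ∈ (groupB ps).items, pr.2 ≠ [] ∧ ∀ u ∈ pr.2, (pr.1 :: u) ∈ ps := by
  have := groupB_inv (fun p => p ∈ ps) ps PySem.Dict.empty (by simp [PySem.Dict.empty]) (fun p hp => hp)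
  exact this

theorem groupB_keys_nodup (ps : List (List String)) : (groupB ps).keys.Nodup := by
  unfold groupB
  generalize hg : PySem.Dict.empty = g0
  have h0 : (g0 : PySem.Dict String (List (List String))).keys.Nodup := by
    rw [← hg]; exact PySem.Dict.nodup_keys_empty
  clear hg
  induction ps generalizing g0 with
  | nil => exact h0
  | cons p ps ih =>
    simp only [List.foldl_cons]
    cases p with
    | nil => exact ih g0 h0
    | cons hd tl =>
      refine ih _ ?_
      simp only [PySem.Dict.modify]
      exact PySem.Dict.nodup_keys_insert _ _ _ h0

theorem trieF_nil (f : Nat) : trieF f [] = .mk .nil := by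
  cases f <;> rfl

-- how 'modify' acts on the raw item list, split by the head entry
theorem modify_items_nil {ν : Type} (hd : String) (dflt : ν) (g0 : ν → ν) :
    ((PySem.Dict.mk ([] : List (String × ν))).modify hd dflt g0).items = [(hd, g0 dflt)] := by
  simp [PySem.Dict.modify, PySem.Dict.insert, PySem.Dict.getD, PySem.Dict.get?,
    PySem.Dict.contains]

theorem modify_items_cons_ne {ν : Type} (k hd : String) (ts : ν) (rest : List (String × ν))
    (dflt : ν) (g0 : ν → ν) (hne : (k == hd) = false) :
    ((PySem.Dict.mk ((k, ts) :: rest)).modify hd dflt g0).items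
      = (k, ts) :: ((PySem.Dict.mk rest).modify hd dflt g0).items := by
  simp only [PySem.Dict.modify, PySem.Dict.insert, PySem.Dict.getD, PySem.Dict.get?,
    PySem.Dict.contains, PySem.Dict.items, List.any_cons, List.find?_cons, hne]
  by_cases hc : (rest.any fun p => p.1 == hd) = true
  · simp only [hc, Bool.false_or, if_true, List.map_cons]
    simp only [hne, Bool.false_eq_true, if_false]
  · simp only [hc, Bool.false_or]
    simp [PySem.Dict.contains, hc]

theorem modify_items_cons_eq {ν : Type} (hd : String) (ts : ν) (rest : List (String × ν))
    (dflt : ν) (g0 : ν → ν) (hrest : ∀ pr ∈ rest, (pr.1 == hd) = false) :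
    ((PySem.Dict.mk ((hd, ts) :: rest)).modify hd dflt g0).items
      = (hd, g0 ts) :: rest := by
  simp only [PySem.Dict.modify, PySem.Dict.insert, PySem.Dict.getD, PySem.Dict.get?,
    PySem.Dict.contains, PySem.Dict.items, List.any_cons, List.find?_cons, beq_self_eq_true,
    Bool.true_or, if_true, cond_true, Option.map_some, Option.getD_some, List.map_cons]
  congr 1
  calc rest.map (fun p => if (p.1 == hd) = true then (hd, g0 ts) else p)
      = rest.map id := List.map_congr_left (fun a ha => by simp [hrest a ha])
    _ = rest := List.map_id rest

theorem insertC_modify (f : Nat)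
    (IH : ∀ (ps : List (List String)) (p : List String),
      (∀ q ∈ ps, q.length < f) → p.length < f →
      insertT (trieF f ps) p = trieF f (ps ++ [p])) :
    ∀ (l : List (String × List (List String))) (hd : String) (tl : List String),
    ((l.map (fun x => x.1)).Nodup) →
    (∀ pr ∈ l, ∀ u ∈ pr.2, u.length < f) → tl.length < f →
    insertC (chL (trieF f) l) hd tl
      = chL (trieF f) (((PySem.Dict.mk l).modify hd [] (fun v => v ++ [tl])).items) := by
  intro l
  induction l with
  | nil =>
    intro hd tl _ _ htl
    rw [modify_items_nil]
    simp only [chL, insertC]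
    have h1 : insertT (trieF f []) tl = trieF f ([] ++ [tl]) := IH [] tl (by simp) htl
    rw [trieF_nil] at h1
    simp only [List.nil_append] at h1
    rw [h1]
    simp
  | cons pr rest ih =>
    obtain ⟨k, ts⟩ := pr
    intro hd tl hnd hb htl
    simp only [List.map_cons, List.nodup_cons] at hnd
    by_cases hk : (k == hd) = true
    · have hkeq : k = hd := by simpa using hk
      subst hkeq
      have hrest : ∀ pr ∈ rest, (pr.1 == k) = false := by
        intro pr hpr
        by_contra hc
        simp only [Bool.not_eq_false, beq_iff_eq] at hc
        exact hnd.1 (by exact List.mem_map.2 ⟨pr, hpr, hc⟩)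
      rw [modify_items_cons_eq k ts rest [] _ hrest]
      simp only [chL, insertC, beq_self_eq_true, if_true]
      rw [IH ts tl (fun u hu => hb (k, ts) (by simp) u hu) htl]
    · rw [modify_items_cons_ne k hd ts rest [] _ (by simpa using hk)]
      simp only [chL, insertC, hk, if_false]
      rw [ih hd tl hnd.2 (fun pr hpr => hb pr (by simp [hpr])) htl]
      simp

theorem snocLemma : ∀ (f : Nat) (ps : List (List String)) (p : List String),
    (∀ q ∈ ps, q.length < f) → p.length < f →
    insertT (trieF f ps) p = trieF f (ps ++ [p]) := by
  intro f
  induction f with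
  | zero => intro ps p _ hp; exact absurd hp (by omega)
  | succ f ihf =>
    intro ps p hps hp
    cases p with
    | nil =>
      have hg : groupB (ps ++ [[]]) = groupB ps := by
        unfold groupB; rw [List.foldl_append]; rfl
      simp only [trieF, insertT, hg]
    | cons hd tl =>
      have hg : groupB (ps ++ [hd :: tl]) = (groupB ps).modify hd [] (fun v => v ++ [tl]) := by
        unfold groupB; rw [List.foldl_append]; rfl
      simp only [trieF, insertT, hg]
      have hnd : (((groupB ps).items.map (fun x => x.1)).Nodup) := groupB_keys_nodup ps
      have hb : ∀ pr ∈ (groupB ps).items, ∀ u ∈ pr.2, u.length < f := by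
        intro pr hpr u hu
        have := (groupB_mem ps pr hpr).2 u hu
        have := hps _ this
        simp only [List.length_cons] at this
        omega
      have htl : tl.length < f := by
        have := hp; simp only [List.length_cons] at this; omega
      exact congrArg Trie.mk (insertC_modify f ihf (groupB ps).items hd tl hnd hb htl)

theorem trieEq (f : Nat) (ps : List (List String)) (h : ∀ q ∈ ps, q.length < f) :
    ps.foldl insertT (.mk .nil) = trieF f ps := by
  induction ps using List.reverseRecOn with
  | nil => rw [trieF_nil]; rfl
  | append_singleton ps p ih =>
    rw [List.foldl_append]
    simp only [List.foldl_cons, List.foldl_nil]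
    rw [ih (fun q hq => h q (by simp [hq]))]
    exact snocLemma f ps p (fun q hq => h q (by simp [hq])) (h p (by simp))

def annSg : Trie → Option String
  | .mk .nil => none
  | .mk (.cons k s r) => some (innerSig (.cons k s r))

theorem wrap_annSg (t : Trie) : wrapSig (annSg t) = sigOf t := by
  obtain ⟨c⟩ := t
  cases c with
  | nil => rfl
  | cons k s r => rfl

-- pure value of B's annotation, expressed through the trie spec
def annRowP (sg : List (List String) → Option String) (sub : List (List String) → AnnB) :
    List (String × List (List String)) → AnnB
  | [] => .nil
  | (k, ts) :: rest => .cons k (sg ts) (sub ts) (annRowP sg sub rest)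

def annOfT : Nat → List (List String) → AnnB
  | 0, _ => .nil
  | f + 1, ps => annRowP (fun ts => annSg (trieF f ts)) (annOfT f) (groupB ps).items

theorem partsEq (f : Nat) :
    ∀ l : List (String × List (List String)),
    annParts (annRowP (fun ts => annSg (trieF f ts)) (annOfT f) l)
      = sigParts (chL (trieF f) l) := by
  intro l
  induction l with
  | nil => rfl
  | cons pr rest ih =>
    obtain ⟨k, ts⟩ := pr
    simp only [annRowP, annParts, chL, sigParts, wrap_annSg, ih]

-- post-order list of the signatures B's annotate counts
def occP : Nat → List (List String) → List String
  | 0, _ => []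
  | f + 1, ps =>
      match (groupB ps).items with
      | [] => []
      | l => ((l.map (fun pr => pr.2)).flatMap (occP f)) ++ [innerSig (chL (trieF f) l)]

theorem annB_spec : ∀ (f : Nat) (ps : List (List String)) (cnt : PySem.Dict String Int),
    (∀ q ∈ ps, q.length < f) →
    (annB f ps cnt).1 = (annSg (trieF f ps), annOfT f ps) ∧
    ∀ x, ((annB f ps cnt).2).getD x 0 = cnt.getD x 0 + ((occP f ps).count x : Int) := by
  intro f
  induction f with
  | zero =>
    intro ps cnt h
    cases ps with
    | nil => exact ⟨rfl, fun x => by simp [annB, occP]⟩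
    | cons q qs => exact absurd (h q (by simp)) (by omega)
  | succ f ihf =>
    intro ps cnt h
    have hb : ∀ pr ∈ (groupB ps).items, ∀ u ∈ pr.2, u.length < f := by
      intro pr hpr u hu
      have h1 := (groupB_mem ps pr hpr).2 u hu
      have h2 := h _ h1
      simp only [List.length_cons] at h2
      omega
    have hrow : ∀ l : List (String × List (List String)),
        (∀ pr ∈ l, ∀ u ∈ pr.2, u.length < f) → ∀ c : PySem.Dict String Int,
        (annRow (annB f) l c).1 = annRowP (fun ts => annSg (trieF f ts)) (annOfT f) l ∧
        ∀ x, ((annRow (annB f) l c).2).getD x 0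
          = c.getD x 0 + (((l.map (fun pr => pr.2)).flatMap (occP f)).count x : Int) := by
      intro l
      induction l with
      | nil => intro _ c; exact ⟨rfl, fun x => by simp [annRow]⟩
      | cons pr rest ihl =>
        obtain ⟨k, ts⟩ := pr
        intro hb' c
        have hch := ihf ts c (fun u hu => hb' (k, ts) (by simp) u hu)
        have hrest := ihl (fun q hq => hb' q (by simp [hq])) ((annB f ts c).2)
        simp only [annRow]
        rcases hc : annB f ts c with ⟨⟨sg0, sub0⟩, cnt0⟩
        rw [hc] at hch hrest
        obtain ⟨hch1, hch2⟩ := hch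
        simp only at hch1 hrest ⊢
        rcases hr : annRow (annB f) rest cnt0 with ⟨r0, cntr⟩
        rw [hr] at hrest
        obtain ⟨hrest1, hrest2⟩ := hrest
        simp only at hrest1 hrest2 ⊢
        constructor
        · simp only [annRowP]
          rw [show sg0 = annSg (trieF f ts) from congrArg Prod.fst hch1,
            show sub0 = annOfT f ts from congrArg Prod.snd hch1, hrest1]
        · intro x
          simp only [List.map_cons, List.flatMap_cons, List.count_append]
          rw [hrest2 x, hch2 x]
          push_cast
          ring
    simp only [annB]
    cases hit : (groupB ps).items with
    | nil =>
      simp only [annRow]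
      refine ⟨?_, ?_⟩
      · simp only [trieF, annOfT, hit, chL, annSg, annRowP]
      · intro x
        simp [occP, hit]
    | cons pr rest =>
      rw [hit] at hb
      obtain ⟨k, ts⟩ := pr
      have h0 := hrow ((k, ts) :: rest) hb cnt
      rcases hres : annRow (annB f) ((k, ts) :: rest) cnt with ⟨ann1, cnt1⟩
      rw [hres] at h0
      obtain ⟨h01, h02⟩ := h0
      have h01' : ann1 = annRowP (fun ts => annSg (trieF f ts)) (annOfT f) ((k, ts) :: rest) :=
        h01
      have h02' : ∀ x, cnt1.getD x 0 = cnt.getD x 0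
          + (((((k, ts) :: rest).map (fun pr => pr.2)).flatMap (occP f)).count x : Int) := h02
      have hcons : annRowP (fun ts => annSg (trieF f ts)) (annOfT f) ((k, ts) :: rest)
          = AnnB.cons k (annSg (trieF f ts)) (annOfT f ts)
              (annRowP (fun ts => annSg (trieF f ts)) (annOfT f) rest) := rfl
      rw [hcons] at h01'
      subst h01'
      have hparts : annParts (AnnB.cons k (annSg (trieF f ts)) (annOfT f ts)
            (annRowP (fun ts => annSg (trieF f ts)) (annOfT f) rest))
          = sigParts (chL (trieF f) ((k, ts) :: rest)) := by
        rw [← hcons]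
        exact partsEq f ((k, ts) :: rest)
      have e1 : annSg (trieF (f + 1) ps)
          = some (PySem.Str.join ""
              (PySem.List.sorted (sigParts (chL (trieF f) ((k, ts) :: rest))) (fun x => x)
                false)) := by
        rw [show trieF (f + 1) ps = Trie.mk (chL (trieF f) (groupB ps).items) from rfl, hit]
        rfl
      have e2 : annOfT (f + 1) ps
          = annRowP (fun ts => annSg (trieF f ts)) (annOfT f) ((k, ts) :: rest) := by
        rw [show annOfT (f + 1) ps
              = annRowP (fun ts => annSg (trieF f ts)) (annOfT f) (groupB ps).items from rfl,
          hit]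
      have hocc : occP (f + 1) ps
          = ((((k, ts) :: rest).map (fun pr => pr.2)).flatMap (occP f))
            ++ [PySem.Str.join ""
                (PySem.List.sorted (sigParts (chL (trieF f) ((k, ts) :: rest))) (fun x => x)
                  false)] := by
        rw [show occP (f + 1) ps
              = (match (groupB ps).items with
                 | [] => []
                 | l => ((l.map (fun pr => pr.2)).flatMap (occP f))
                     ++ [innerSig (chL (trieF f) l)]) from rfl, hit]
        rfl
      refine ⟨?_, ?_⟩
      · show (some (PySem.Str.join ""
            (PySem.List.sorted (annParts (AnnB.cons k (annSg (trieF f ts)) (annOfT f ts)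
              (annRowP (fun ts => annSg (trieF f ts)) (annOfT f) rest))) (fun x => x) false)),
            AnnB.cons k (annSg (trieF f ts)) (annOfT f ts)
              (annRowP (fun ts => annSg (trieF f ts)) (annOfT f) rest))
          = (annSg (trieF (f + 1) ps), annOfT (f + 1) ps)
        rw [e1, e2, hcons, hparts]
      · intro x
        show (cnt1.insert
            (PySem.Str.join ""
              (PySem.List.sorted (annParts (AnnB.cons k (annSg (trieF f ts)) (annOfT f ts)
                (annRowP (fun ts => annSg (trieF f ts)) (annOfT f) rest))) (fun x => x) false))
            (cnt1.getD
              (PySem.Str.join ""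
                (PySem.List.sorted (annParts (AnnB.cons k (annSg (trieF f ts)) (annOfT f ts)
                  (annRowP (fun ts => annSg (trieF f ts)) (annOfT f) rest))) (fun x => x) false))
              0 + 1)).getD x 0
          = cnt.getD x 0 + ((occP (f + 1) ps).count x : Int)
        rw [hparts, PySem.Dict.getD_insert, hocc, List.count_append, List.count_singleton]
        by_cases hx : x = PySem.Str.join ""
            (PySem.List.sorted (sigParts (chL (trieF f) ((k, ts) :: rest))) (fun x => x) false)
        · subst hx
          rw [if_pos rfl, h02' _]
          simp only [beq_self_eq_true, if_true]
          push_cast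
          ring
        · rw [if_neg hx, h02' x]
          have hbx : ((PySem.Str.join ""
              (PySem.List.sorted (sigParts (chL (trieF f) ((k, ts) :: rest))) (fun x => x)
                false) == x) : Bool) = false := by
            simpa [beq_iff_eq] using Ne.symm hx
          simp [hbx]

theorem occC_chL : ∀ (F : List (List String) → Trie) (l : List (String × List (List String))),
    occC (chL F l) = l.flatMap (fun pr => occT (F pr.2))
  | F, [] => rfl
  | F, (k, ts) :: rest => by
      simp only [chL, occC, List.flatMap_cons, occC_chL F rest]

theorem occ_count_eq : ∀ (f : Nat) (ps : List (List String)),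
    (∀ q ∈ ps, q.length < f) → ∀ x, (occP f ps).count x = (occT (trieF f ps)).count x := by
  intro f
  induction f with
  | zero =>
    intro ps h x
    cases ps with
    | nil => rfl
    | cons q qs => exact absurd (h q (by simp)) (by omega)
  | succ f ihf =>
    intro ps h x
    have hb : ∀ pr ∈ (groupB ps).items, ∀ u ∈ pr.2, u.length < f := by
      intro pr hpr u hu
      have h1 := (groupB_mem ps pr hpr).2 u hu
      have h2 := h _ h1
      simp only [List.length_cons] at h2
      omega
    simp only [occP, trieF]
    cases hit : (groupB ps).items with
    | nil => simp [chL, occT]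
    | cons pr rest =>
      rw [hit] at hb
      obtain ⟨k, ts⟩ := pr
      have aux : ∀ l : List (String × List (List String)),
          (∀ pr ∈ l, ∀ u ∈ pr.2, u.length < f) →
          ((l.map (fun pr => pr.2)).flatMap (occP f)).count x
            = (l.flatMap (fun pr => occT (trieF f pr.2))).count x := by
        intro l
        induction l with
        | nil => intro _; rfl
        | cons pr' rest' ihl =>
          intro hb'
          simp only [List.map_cons, List.flatMap_cons, List.count_append]
          rw [ihl (fun q hq => hb' q (by simp [hq])),
            ihf pr'.2 (fun u hu => hb' pr' (by simp) u hu) x]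
      simp only [chL, occT]
      rw [show TChildren.cons k (trieF f ts) (chL (trieF f) rest)
            = chL (trieF f) ((k, ts) :: rest) from rfl, occC_chL,
        List.count_append, List.count_append, aux ((k, ts) :: rest) hb]

mutual
theorem encodeT_fst : ∀ (t : Trie) (st : PySem.Dict String (List Trie)),
    (encodeT t st).1 = sigOf t
  | .mk .nil, st => rfl
  | .mk (.cons k s r), st => by
      simp only [encodeT, sigOf]
      rw [encodeC_fst (.cons k s r) st]
theorem encodeC_fst : ∀ (c : TChildren) (st : PySem.Dict String (List Trie)),
    (encodeC c st).1 = sigParts c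
  | .nil, st => rfl
  | .cons k s r, st => by
      simp only [encodeC, sigParts]
      rw [encodeT_fst s st, encodeC_fst r ((encodeT s st).2)]
end

mutual
theorem encodeT_len : ∀ (t : Trie) (st : PySem.Dict String (List Trie)) (x : String),
    (((encodeT t st).2).getD x []).length = ((st.getD x []).length) + (occT t).count x
  | .mk .nil, st, x => by simp [encodeT, occT]
  | .mk (.cons k s r), st, x => by
      have hfst := encodeC_fst (.cons k s r) st
      have hlen := encodeC_len (.cons k s r) st x
      simp only [encodeT, occT]
      rw [PySem.Dict.getD_insert]
      rw [hfst]
      by_cases hx : x = innerSig (.cons k s r)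
      · simp only [innerSig] at hx ⊢
        rw [if_pos hx]
        simp only [List.length_append, List.count_append, List.count_singleton]
        subst hx
        simp only [beq_self_eq_true, if_true]
        rw [hlen]
        simp only [List.length_cons, List.length_nil]
        omega
      · simp only [innerSig] at hx ⊢
        rw [if_neg hx]
        rw [hlen]
        simp [List.count_append, Ne.symm hx]
theorem encodeC_len : ∀ (c : TChildren) (st : PySem.Dict String (List Trie)) (x : String),
    (((encodeC c st).2).getD x []).length = ((st.getD x []).length) + (occC c).count x
  | .nil, st, x => by simp [encodeC, occC]
  | .cons k s r, st, x => by
      simp only [encodeC, occC]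
      rw [encodeC_len r ((encodeT s st).2) x, encodeT_len s st x]
      simp [List.count_append]
      omega
end

theorem hasHash_chL (g : List (List String) → Trie) : ∀ l : List (String × List (List String)),
    hasHashChild (chL g l) = l.any (fun pr => pr.1 == "#")
  | [] => rfl
  | (k, ts) :: rest => by
      simp only [chL, hasHashChild, List.any_cons, hasHash_chL g rest]

-- the central correspondence: A's collect over the trie = B's walk over the annotation
theorem collect_eq_walk (store : PySem.Dict String (List Trie)) (cnt : PySem.Dict String Int)
    (H : ∀ c : TChildren, (decide (1 < (store.getD (innerSig c) []).length) : Bool)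
        = decide (1 < cnt.getD (innerSig c) 0)) :
    ∀ (f : Nat) (l : List (String × List (List String))) (pre : List String),
    (∀ pr ∈ l, ∀ u ∈ pr.2, u.length < f) →
    (∀ pr ∈ l, ∀ u ∈ pr.2, ∀ n ∈ u, n ≠ "#") →
    (∀ pr ∈ l, pr.2 ≠ []) →
    collectC store (chL (trieF f) l) pre
      = walkB cnt (annRowP (fun ts => annSg (trieF f ts)) (annOfT f) l) pre := by
  intro f
  induction f with
  | zero =>
    intro l pre hb _ hne
    cases l with
    | nil => rfl
    | cons pr rest =>
      cases hval : pr.2 with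
      | nil => exact absurd hval (hne pr (by simp))
      | cons u0 us => exact absurd (hb pr (by simp) u0 (by simp [hval])) (by omega)
  | succ f ihf =>
    intro l
    induction l with
    | nil => intro pre _ _ _; rfl
    | cons pr rest ihl =>
      obtain ⟨k, ts⟩ := pr
      intro pre hb hcl hne
      have hbts : ∀ u ∈ ts, u.length < f + 1 := fun u hu => hb (k, ts) (by simp) u hu
      have hclts : ∀ u ∈ ts, ∀ n ∈ u, n ≠ "#" := fun u hu => hcl (k, ts) (by simp) u hu
      have hhash : hasHashChild (kidsOf (trieF (f + 1) ts)) = false := by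
        simp only [trieF, kidsOf, hasHash_chL]
        by_contra hcon
        simp only [Bool.not_eq_false, List.any_eq_true] at hcon
        obtain ⟨pr', hpr', hk'⟩ := hcon
        obtain ⟨hne', hmem'⟩ := groupB_mem ts pr' hpr'
        cases hval : pr'.2 with
        | nil => exact hne' hval
        | cons u0 us =>
          have hm : (pr'.1 :: u0) ∈ ts := hmem' u0 (by simp [hval])
          have hkeq : pr'.1 = "#" := by simpa using hk'
          exact hclts _ hm pr'.1 (by simp) hkeq
      have hcond : (collectMark store (trieF (f + 1) ts)
            || hasHashChild (kidsOf (trieF (f + 1) ts)))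
          = (match annSg (trieF (f + 1) ts) with
             | some x => decide (1 < cnt.getD x 0) | none => false) := by
        rw [hhash, Bool.or_false]
        cases hit : (groupB ts).items with
        | nil => simp [trieF, hit, chL, collectMark, annSg]
        | cons pr0 rest0 =>
          obtain ⟨k0, ts0⟩ := pr0
          simp only [trieF, hit, chL, collectMark, annSg]
          exact H (TChildren.cons k0 (trieF f ts0) (chL (trieF f) rest0))
      have hchild : collectT store (trieF (f + 1) ts) (pre ++ [k])
          = walkB cnt (annOfT (f + 1) ts) (pre ++ [k]) := by
        have hb' : ∀ pr' ∈ (groupB ts).items, ∀ u ∈ pr'.2, u.length < f := by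
          intro pr' hpr' u hu
          have h1 := (groupB_mem ts pr' hpr').2 u hu
          have h2 := hbts _ h1
          simp only [List.length_cons] at h2
          omega
        have hcl' : ∀ pr' ∈ (groupB ts).items, ∀ u ∈ pr'.2, ∀ n ∈ u, n ≠ "#" := by
          intro pr' hpr' u hu n hn
          have h1 := (groupB_mem ts pr' hpr').2 u hu
          exact hclts _ h1 n (by simp [hn])
        have hne' : ∀ pr' ∈ (groupB ts).items, pr'.2 ≠ [] :=
          fun pr' hpr' => (groupB_mem ts pr' hpr').1
        have := ihf (groupB ts).items (pre ++ [k]) hb' hcl' hne'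
        simp only [trieF, annOfT]
        exact this
      simp only [chL, collectC, annRowP, walkB]
      rw [hcond, hchild, ihl pre (fun q hq => hb q (by simp [hq]))
        (fun q hq => hcl q (by simp [hq])) (fun q hq => hne q (by simp [hq]))]

theorem witnessA_eval :
    deleteDuplicateFolder pvDiffWitness_deleteDuplicateFolder = pvDiffWitnessOut_deleteDuplicateFolder.1 := by
  simp only [pvDiffWitness_deleteDuplicateFolder, pvDiffWitnessOut_deleteDuplicateFolder,
    deleteDuplicateFolder, List.foldl, insertT, insertC]
  decide

theorem witnessB_eval :
    deleteDuplicateFolder_alt pvDiffWitness_deleteDuplicateFolder = pvDiffWitnessOut_deleteDuplicateFolder.2 := by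
  simp only [pvDiffWitness_deleteDuplicateFolder, pvDiffWitnessOut_deleteDuplicateFolder,
    deleteDuplicateFolder_alt]
  decide

-- ===== VERDICT (by name: the statements are the Claim_ definitions above) =====
theorem deleteDuplicateFolder_spec : Claim_unchanged_deleteDuplicateFolder := by
  intro paths _ hD
  unfold deleteDuplicateFolder deleteDuplicateFolder_alt
  have hbound : ∀ q ∈ paths, q.length < (paths.map List.length).sum + 1 := by
    intro q hq
    have : q.length ≤ (paths.map List.length).sum :=
      List.single_le_sum (fun x _ => Nat.zero_le x) _ (List.mem_map_of_mem hq)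
    omega
  have htree : paths.foldl insertT (.mk .nil)
      = trieF ((paths.map List.length).sum + 1) paths :=
    trieEq _ paths hbound
  set M := (paths.map List.length).sum with hM
  set tree := paths.foldl insertT (Trie.mk TChildren.nil) with htr
  set store := (encodeT tree PySem.Dict.empty).2 with hst
  have hann := annB_spec (M + 1) paths PySem.Dict.empty hbound
  set cnt := (annB (M + 1) paths PySem.Dict.empty).2 with hcnt
  have H : ∀ c : TChildren, (decide (1 < (store.getD (innerSig c) []).length) : Bool)
      = decide (1 < cnt.getD (innerSig c) 0) := by
    intro c
    have h1 : (store.getD (innerSig c) []).length = (occT tree).count (innerSig c) := by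
      rw [hst, encodeT_len tree PySem.Dict.empty (innerSig c)]
      simp
    have h2 : cnt.getD (innerSig c) 0 = ((occP (M + 1) paths).count (innerSig c) : Int) := by
      rw [hcnt, hann.2 (innerSig c)]
      simp
    have h3 : (occP (M + 1) paths).count (innerSig c) = (occT tree).count (innerSig c) := by
      rw [htree]
      exact occ_count_eq (M + 1) paths hbound (innerSig c)
    rw [h1, h2, h3, decide_eq_decide]
    constructor <;> intro hlt <;> exact_mod_cast hlt
  have hclean : ∀ pr ∈ (groupB paths).items, ∀ u ∈ pr.2, ∀ n ∈ u, n ≠ "#" := by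
    intro pr hpr u hu n hn hne
    have h1 := (groupB_mem paths pr hpr).2 u hu
    exact hD ⟨pr.1 :: u, h1, by simpa [hne] using hn⟩
  have hb : ∀ pr ∈ (groupB paths).items, ∀ u ∈ pr.2, u.length < M := by
    intro pr hpr u hu
    have h1 := (groupB_mem paths pr hpr).2 u hu
    have h2 := hbound _ h1
    simp only [List.length_cons] at h2
    omega
  have hne : ∀ pr ∈ (groupB paths).items, pr.2 ≠ [] :=
    fun pr hpr => (groupB_mem paths pr hpr).1
  have hmain := collect_eq_walk store cnt H M (groupB paths).items [] hb hclean hne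
  have htree' : tree = Trie.mk (chL (trieF M) (groupB paths).items) := by
    rw [htree]
    rfl
  have hannv : (annB (M + 1) paths PySem.Dict.empty).1.2 = annOfT (M + 1) paths := by
    rw [show (annB (M + 1) paths PySem.Dict.empty).1
          = (annSg (trieF (M + 1) paths), annOfT (M + 1) paths) from hann.1]
  calc collectT store tree []
      = collectC store (chL (trieF M) (groupB paths).items) [] := by rw [htree']; rfl
    _ = walkB cnt (annRowP (fun ts => annSg (trieF M ts)) (annOfT M) (groupB paths).items) []
        := hmain
    _ = walkB cnt (annOfT (M + 1) paths) [] := rfl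
    _ = walkB cnt (annB (M + 1) paths PySem.Dict.empty).1.2 [] := by rw [hannv]

theorem deleteDuplicateFolder_changed : Claim_changed_deleteDuplicateFolder := by
  unfold Claim_changed_deleteDuplicateFolder
  refine ⟨by decide, ⟨["a", "#"], by decide, by decide⟩, witnessA_eval, witnessB_eval, by decide⟩
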